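-- pv_equiv track=rewrite | github.com/Ready2k/Project3 | app/services/pattern_creator.py | _detect_security_requirements
-- ===== SOURCE A (Python) =====
-- from typing import Dict, List, Any, Optional
--
-- def _detect_security_requirements(
--     description: str, requirements: Dict[str, Any]
-- ) -> List[str]:
--     """Detect security requirements."""
--     desc_lower = description.lower()
--     security_reqs = []
--
--     if any(
--         word in desc_lower
--         for word in ["encrypt", "secure", "private", "confidential"]
--     ):
--         security_reqs.append("encryption")
--     if any(
--         word in desc_lower for word in ["auth", "login", "permission", "access"]
--     ):
--         security_reqs.append("authentication")
--     if any(word in desc_lower for word in ["audit", "log", "track", "monitor"]):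
--         security_reqs.append("audit_logging")
--     if any(
--         word in desc_lower for word in ["gdpr", "hipaa", "compliance", "regulation"]
--     ):
--         security_reqs.append("compliance")
--
--     return security_reqs
-- ===== SOURCE B (Python) =====
-- # Alternative algorithm: one left-to-right scan over the positions of the
-- # lowercased description; at each position every (keyword, tag) pattern is
-- # tested as a PREFIX of the remaining text (naive multi-pattern matching),
-- # accumulating hit tags in a set; tags are then emitted in canonical order.
-- _KEYWORD_TAGS = [
--     ("encrypt", "encryption"), ("secure", "encryption"),
--     ("private", "encryption"), ("confidential", "encryption"),
--     ("auth", "authentication"), ("login", "authentication"),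
--     ("permission", "authentication"), ("access", "authentication"),
--     ("audit", "audit_logging"), ("log", "audit_logging"),
--     ("track", "audit_logging"), ("monitor", "audit_logging"),
--     ("gdpr", "compliance"), ("hipaa", "compliance"),
--     ("compliance", "compliance"), ("regulation", "compliance"),
-- ]
-- _TAG_ORDER = ["encryption", "authentication", "audit_logging", "compliance"]
--
-- def _detect_security_requirements(description, requirements):
--     desc = description.lower()
--     hits = set()
--     for i in range(len(desc)):
--         rest = desc[i:]
--         for kw, tag in _KEYWORD_TAGS:
--             if rest.startswith(kw):
--                 hits.add(tag)
--     return [tag for tag in _TAG_ORDER if tag in hits]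
-- ===== Notes on version B (the rewrite author's own statement) =====
-- stated objective: alternative
-- what changed: Replaces four per-keyword substring-membership branches with a single position-by-position scan of the lowercased description that tests each (keyword, tag) pattern as a prefix of the remaining suffix (naive multi-pattern matching into a hit set), then emits tags in the canonical fixed order.
import Mathlib
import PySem

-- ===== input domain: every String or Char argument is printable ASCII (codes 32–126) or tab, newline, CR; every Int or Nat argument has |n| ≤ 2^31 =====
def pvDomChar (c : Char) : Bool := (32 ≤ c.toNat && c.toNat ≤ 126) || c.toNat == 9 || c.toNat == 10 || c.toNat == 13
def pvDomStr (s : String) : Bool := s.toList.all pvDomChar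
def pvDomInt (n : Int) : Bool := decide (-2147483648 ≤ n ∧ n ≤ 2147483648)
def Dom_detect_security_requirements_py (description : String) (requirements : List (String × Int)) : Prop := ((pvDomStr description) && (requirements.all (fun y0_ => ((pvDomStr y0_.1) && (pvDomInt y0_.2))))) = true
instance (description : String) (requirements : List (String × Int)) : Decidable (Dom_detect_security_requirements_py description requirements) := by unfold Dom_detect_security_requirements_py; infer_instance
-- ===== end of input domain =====

-- B replaces the four hard-coded substring-membership branches with a single
-- position-by-position prefix scan collecting hit tags into a set (objective: alternative).

-- ===== PORT A =====
def detect_security_requirements_py (description : String) (requirements : List (String × Int)) : List String :=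
  let desc_lower := PySem.Str.lower description
  let security_reqs : List String := []
  let security_reqs := if (["encrypt", "secure", "private", "confidential"].any
      (fun word => PySem.Str.isIn word desc_lower)) then security_reqs ++ ["encryption"] else security_reqs
  let security_reqs := if (["auth", "login", "permission", "access"].any
      (fun word => PySem.Str.isIn word desc_lower)) then security_reqs ++ ["authentication"] else security_reqs
  let security_reqs := if (["audit", "log", "track", "monitor"].any
      (fun word => PySem.Str.isIn word desc_lower)) then security_reqs ++ ["audit_logging"] else security_reqs
  let security_reqs := if (["gdpr", "hipaa", "compliance", "regulation"].any
      (fun word => PySem.Str.isIn word desc_lower)) then security_reqs ++ ["compliance"] else security_reqs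
  security_reqs

-- ===== PORT B =====
def pvKeywordTags : List (String × String) :=
  [("encrypt", "encryption"), ("secure", "encryption"),
   ("private", "encryption"), ("confidential", "encryption"),
   ("auth", "authentication"), ("login", "authentication"),
   ("permission", "authentication"), ("access", "authentication"),
   ("audit", "audit_logging"), ("log", "audit_logging"),
   ("track", "audit_logging"), ("monitor", "audit_logging"),
   ("gdpr", "compliance"), ("hipaa", "compliance"),
   ("compliance", "compliance"), ("regulation", "compliance")]

def pvTagOrder : List String := ["encryption", "authentication", "audit_logging", "compliance"]

def detect_security_requirements_py_alt (description : String) (requirements : List (String × Int)) : List String :=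
  let desc := PySem.Str.lower description
  let hits : PySem.Set String :=
    (PySem.List.pyRange 0 (PySem.Str.len desc) 1).foldl
      (fun hits i =>
        let rest := PySem.Str.slice desc (some i) none
        pvKeywordTags.foldl
          (fun hits p => if PySem.Str.startswith rest p.1 then PySem.Set.add hits p.2 else hits)
          hits)
      PySem.Set.empty
  pvTagOrder.filter (fun tag => PySem.Set.contains hits tag)

-- ===== PRECONDITION & SPEC =====
def Spec_detect_security_requirements_py (description : String) (requirements : List (String × Int)) (out : List String) : Prop := out = detect_security_requirements_py_alt description requirements
instance (description : String) (requirements : List (String × Int)) (out : List String) : Decidable (Spec_detect_security_requirements_py description requirements out) := by unfold Spec_detect_security_requirements_py; infer_instance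

-- ===== CLAIM (what is proved, stated in full; the proofs are below) =====
def Claim_equal_detect_security_requirements_py : Prop := ∀ (description : String) (requirements : List (String × Int)), Dom_detect_security_requirements_py description requirements → Spec_detect_security_requirements_py description requirements (detect_security_requirements_py description requirements)

-- ===== LEMMAS AND PROOFS =====

-- membership in the inner fold over the keyword table
lemma pv_mem_inner (rest : String) (s : PySem.Set String) (tbl : List (String × String)) (x : String) :
    x ∈ tbl.foldl (fun hits p => if PySem.Str.startswith rest p.1 then PySem.Set.add hits p.2 else hits) s
      ↔ x ∈ s ∨ ∃ p ∈ tbl, PySem.Str.startswith rest p.1 = true ∧ p.2 = x := by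
  induction tbl generalizing s with
  | nil => simp
  | cons q t ih =>
    simp only [List.foldl_cons, ih, List.mem_cons]
    split_ifs with h
    · rw [PySem.Set.mem_add]
      constructor
      · rintro (((hs | rfl) | ⟨p, hp, hc, rfl⟩))
        · exact Or.inl hs
        · exact Or.inr ⟨q, Or.inl rfl, h, rfl⟩
        · exact Or.inr ⟨p, Or.inr hp, hc, rfl⟩
      · rintro (hs | ⟨p, (rfl | hp), hc, rfl⟩)
        · exact Or.inl (Or.inl hs)
        · exact Or.inl (Or.inr rfl)
        · exact Or.inr ⟨p, hp, hc, rfl⟩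
    · constructor
      · rintro (hs | ⟨p, hp, hc, rfl⟩)
        · exact Or.inl hs
        · exact Or.inr ⟨p, Or.inr hp, hc, rfl⟩
      · rintro (hs | ⟨p, (rfl | hp), hc, rfl⟩)
        · exact Or.inl hs
        · exact absurd hc h
        · exact Or.inr ⟨p, hp, hc, rfl⟩

-- membership in the outer fold over positions
lemma pv_mem_outer (desc : String) (l : List Int) (s : PySem.Set String) (x : String) :
    x ∈ l.foldl (fun hits i =>
        pvKeywordTags.foldl (fun hits p =>
          if PySem.Str.startswith (PySem.Str.slice desc (some i) none) p.1 then PySem.Set.add hits p.2 else hits) hits) s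
      ↔ x ∈ s ∨ ∃ i ∈ l, ∃ p ∈ pvKeywordTags,
          PySem.Str.startswith (PySem.Str.slice desc (some i) none) p.1 = true ∧ p.2 = x := by
  induction l generalizing s with
  | nil => simp
  | cons j t ih =>
    simp only [List.foldl_cons, ih, pv_mem_inner, List.mem_cons]
    constructor
    · rintro ((hs | ⟨p, hp, hc, rfl⟩) | ⟨i, hi, p, hp, hc, rfl⟩)
      · exact Or.inl hs
      · exact Or.inr ⟨j, Or.inl rfl, p, hp, hc, rfl⟩
      · exact Or.inr ⟨i, Or.inr hi, p, hp, hc, rfl⟩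
    · rintro (hs | ⟨i, (rfl | hi), p, hp, hc, rfl⟩)
      · exact Or.inl (Or.inl hs)
      · exact Or.inl (Or.inr ⟨p, hp, hc, rfl⟩)
      · exact Or.inr ⟨i, hi, p, hp, hc, rfl⟩

-- a position-scan hit for a nonempty keyword is exactly substring membership
lemma pv_scan_iff_isIn (desc kw : String) (hne : kw.toList ≠ []) :
    (∃ i ∈ PySem.List.pyRange 0 (PySem.Str.len desc) 1,
        PySem.Str.startswith (PySem.Str.slice desc (some i) none) kw = true)
      ↔ PySem.Str.isIn kw desc = true := by
  rw [PySem.Str.isIn_eq, ← PySem.Chars.exists_prefix_drop_iff_isIn]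
  constructor
  · rintro ⟨i, hi, hsw⟩
    rcases (PySem.List.mem_pyRange_one).mp hi with ⟨h0, _⟩
    refine ⟨i.toNat, ?_⟩
    have := hsw
    rw [PySem.Str.startswith_eq, PySem.Str.toList_slice] at this
    unfold PySem.Chars.slice at this
    rw [PySem.List.slice_from _ h0, PySem.Chars.startswith_iff] at this
    exact this
  · rintro ⟨j, hj⟩
    have hjlt : j < desc.toList.length := by
      by_contra hge
      push_neg at hge
      rw [List.drop_eq_nil_of_le hge] at hj
      exact hne (List.prefix_nil.mp hj)
    refine ⟨(j : Int), ?_, ?_⟩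
    · rw [PySem.List.mem_pyRange_one]
      constructor
      · exact Int.natCast_nonneg j
      · simp [PySem.Str.len_eq]
        exact_mod_cast hjlt
    · rw [PySem.Str.startswith_eq, PySem.Str.toList_slice]
      unfold PySem.Chars.slice
      rw [PySem.List.slice_from _ (Int.natCast_nonneg j), PySem.Chars.startswith_iff]
      simpa using hj

-- the hit set contains a tag iff one of its group's keywords occurs in desc
lemma pv_contains_group (desc : String) (tag : String) (kws : List String)
    (hk : ∀ p ∈ pvKeywordTags, p.2 = tag ↔ p.1 ∈ kws)
    (hm : ∀ w ∈ kws, ∃ p ∈ pvKeywordTags, p.1 = w)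
    (hne : ∀ p ∈ pvKeywordTags, p.1.toList ≠ []) :
    PySem.Set.contains
      ((PySem.List.pyRange 0 (PySem.Str.len desc) 1).foldl
        (fun hits i =>
          pvKeywordTags.foldl (fun hits p =>
            if PySem.Str.startswith (PySem.Str.slice desc (some i) none) p.1 then PySem.Set.add hits p.2 else hits) hits)
        PySem.Set.empty) tag
      = kws.any (fun w => PySem.Str.isIn w desc) := by
  rw [Bool.eq_iff_iff, PySem.Set.contains_iff, pv_mem_outer, List.any_eq_true]
  constructor
  · rintro (hs | ⟨i, hi, p, hp, hc, rfl⟩)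
    · simp [PySem.Set.empty] at hs
    · refine ⟨p.1, (hk p hp).mp rfl, ?_⟩
      exact (pv_scan_iff_isIn desc p.1 (hne p hp)).mp ⟨i, hi, hc⟩
  · rintro ⟨w, hw, hf⟩
    rcases hm w hw with ⟨p, hp, rfl⟩
    rcases (pv_scan_iff_isIn desc p.1 (hne p hp)).mpr hf with ⟨i, hi, hsw⟩
    exact Or.inr ⟨i, hi, p, hp, hsw, (hk p hp).mpr hw⟩

lemma pv_main (dl : String) :
    (let s : List String := []
     let s := if (["encrypt", "secure", "private", "confidential"].any
         (fun word => PySem.Str.isIn word dl)) then s ++ ["encryption"] else s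
     let s := if (["auth", "login", "permission", "access"].any
         (fun word => PySem.Str.isIn word dl)) then s ++ ["authentication"] else s
     let s := if (["audit", "log", "track", "monitor"].any
         (fun word => PySem.Str.isIn word dl)) then s ++ ["audit_logging"] else s
     let s := if (["gdpr", "hipaa", "compliance", "regulation"].any
         (fun word => PySem.Str.isIn word dl)) then s ++ ["compliance"] else s
     s)
    = pvTagOrder.filter (fun tag => PySem.Set.contains
        ((PySem.List.pyRange 0 (PySem.Str.len dl) 1).foldl
          (fun hits i =>
            pvKeywordTags.foldl (fun hits p =>
              if PySem.Str.startswith (PySem.Str.slice dl (some i) none) p.1 then PySem.Set.add hits p.2 else hits) hits)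
          PySem.Set.empty) tag) := by
  have hE := pv_contains_group dl "encryption" ["encrypt", "secure", "private", "confidential"]
    (by decide) (by decide) (by decide)
  have hA := pv_contains_group dl "authentication" ["auth", "login", "permission", "access"]
    (by decide) (by decide) (by decide)
  have hL := pv_contains_group dl "audit_logging" ["audit", "log", "track", "monitor"]
    (by decide) (by decide) (by decide)
  have hC := pv_contains_group dl "compliance" ["gdpr", "hipaa", "compliance", "regulation"]
    (by decide) (by decide) (by decide)
  simp only [pvTagOrder, List.filter_cons, List.filter_nil, hE, hA, hL, hC]
  generalize (["encrypt", "secure", "private", "confidential"].any (fun w => PySem.Str.isIn w dl)) = b1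
  generalize (["auth", "login", "permission", "access"].any (fun w => PySem.Str.isIn w dl)) = b2
  generalize (["audit", "log", "track", "monitor"].any (fun w => PySem.Str.isIn w dl)) = b3
  generalize (["gdpr", "hipaa", "compliance", "regulation"].any (fun w => PySem.Str.isIn w dl)) = b4
  cases b1 <;> cases b2 <;> cases b3 <;> cases b4 <;> rfl

-- ===== VERDICT (by name: the statement is the Claim_ definition above) =====
theorem detect_security_requirements_py_spec : Claim_equal_detect_security_requirements_py := by
  intro description requirements _
  unfold Spec_detect_security_requirements_py detect_security_requirements_py detect_security_requirements_py_alt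
  exact pv_main (PySem.Str.lower description)
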